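-- pv_equiv track=rewrite | github.com/lambda-feedback/compareConstructs | app/utils.py | check_indents
-- ===== SOURCE A (Python) =====
-- def check_indents(code_string: str) -> bool:
--     """
--     This function checks the indentation correctness of the given Python code.
--     Notice that indentation depends on student preference: (2 spaces or 4 spaces are acceptable)
--
--     :param code_string: str, the Python code to be checked.
--     :return: bool, True if the indentation is correct, otherwise False.
--     """
--     indent_levels = []
--     lines = code_string.strip().split('\n')
--     for line in lines:
--         indent_level = len(line) - len(line.lstrip(' '))
--         indent_levels.append(indent_level)
--
--     # first line should not have any indents
--     if indent_levels[0] != 0: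
--         return False
--
--     # find the correctness indent: 2 or 4 spaces
--     indent_difference = 0
--     for indent_level in indent_levels:
--         if indent_level > 0:
--             indent_difference = indent_level
--             break
--
--     # zero indent only occur when they are no any syntax like (if, for)
--     if indent_difference == 0:
--         return all(indent_level == 0 for indent_level in indent_levels)
--
--     # correct indents
--     if indent_difference != 2 and indent_difference != 4:
--         return False
--
--     return all(indent_level % indent_difference == 0 for indent_level in indent_levels)
-- ===== SOURCE B (Python) =====
-- def check_indents(code_string: str) -> bool:
--     # Single fused pass: never builds the indent_levels list; uses the first
--     # positive indent as the divisor while scanning, like A's break-scan does.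
--     lines = code_string.strip().split('\n')
--     first = lines[0]
--     if len(first) != len(first.lstrip(' ')):
--         return False
--     divisor = 0
--     for line in lines[1:]:
--         indent = len(line) - len(line.lstrip(' '))
--         if divisor == 0:
--             if indent > 0:
--                 if indent != 2 and indent != 4:
--                     return False
--                 divisor = indent
--         elif indent % divisor != 0:
--             return False
--     return True
-- ===== Notes on version B (the rewrite author's own statement) =====
-- stated objective: simpler
-- what changed: A builds the full indent_levels list and then makes three more passes (first-element check, break-scan for the first positive indent, an all() validation); B keeps the first-line check and fuses everything else into one early-exit loop over the lines that carries only the divisor and never materialises the indent list.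
import Mathlib
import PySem

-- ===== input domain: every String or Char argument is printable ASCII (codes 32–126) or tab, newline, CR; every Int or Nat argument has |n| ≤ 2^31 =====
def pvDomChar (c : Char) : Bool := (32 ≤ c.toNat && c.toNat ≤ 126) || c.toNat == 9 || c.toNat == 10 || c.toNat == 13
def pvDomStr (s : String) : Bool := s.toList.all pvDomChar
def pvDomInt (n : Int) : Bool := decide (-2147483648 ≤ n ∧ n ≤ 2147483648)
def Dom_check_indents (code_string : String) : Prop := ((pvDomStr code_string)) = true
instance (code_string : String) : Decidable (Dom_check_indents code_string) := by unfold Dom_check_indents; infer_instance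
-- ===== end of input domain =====

-- B fuses A's three passes (indent list build, first-positive scan, all-checks) into one
-- early-exit loop holding only the divisor; objective: simpler, same cost.


-- ===== PORT A =====
-- len(line) - len(line.lstrip(' ')) — the same expression in both Pythons; lstrip(' ')
-- drops exactly the leading spaces, ported by hand as dropWhile (· == ' ') (exact)
def pvIndent (cs : List Char) : Int :=
  (cs.length : Int) - ((cs.dropWhile (fun c => c == ' ')).length : Int)

-- A's first-positive for-loop with break (indent_difference starts at 0)
def pvFirstPos : List Int → Int
  | [] => 0
  | x :: xs => if x > 0 then x else pvFirstPos xs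

def check_indents (code_string : String) : Bool :=
  let lines := PySem.Chars.splitOn (PySem.Chars.strip code_string.toList) ['\n']
  let indent_levels := lines.foldl (fun acc l => acc ++ [pvIndent l]) []
  -- indent_levels[0]: split always yields ≥ 1 piece, so the index is in range and getD is exact
  if PySem.List.pyGetD indent_levels 0 0 ≠ 0 then false
  else
    let indent_difference := pvFirstPos indent_levels
    if indent_difference = 0 then indent_levels.all (fun x => x == 0)
    else if indent_difference ≠ 2 ∧ indent_difference ≠ 4 then false
    else indent_levels.all (fun x => PySem.Int.mod x indent_difference == 0)

-- ===== PORT B =====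
-- B's single loop over the remaining lines, carrying only the divisor
def pvAltGo : List (List Char) → Int → Bool
  | [], _ => true
  | l :: ls, divisor =>
    let indent := pvIndent l
    if divisor = 0 then
      if indent > 0 then
        if indent ≠ 2 ∧ indent ≠ 4 then false
        else pvAltGo ls indent
      else pvAltGo ls divisor
    else if PySem.Int.mod indent divisor ≠ 0 then false
    else pvAltGo ls divisor

def check_indents_alt (code_string : String) : Bool :=
  match PySem.Chars.splitOn (PySem.Chars.strip code_string.toList) ['\n'] with
  | [] => true   -- unreachable: split yields ≥ 1 piece (Python indexes lines[0])
  | first :: rest =>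
    if pvIndent first ≠ 0 then false
    else pvAltGo rest 0

-- ===== PRECONDITION & SPEC =====
def Spec_check_indents (code_string : String) (out : Bool) : Prop := out = check_indents_alt code_string
instance (code_string : String) (out : Bool) : Decidable (Spec_check_indents code_string out) := by unfold Spec_check_indents; infer_instance

-- ===== CLAIM (what is proved, stated in full; the proofs are below) =====
def Claim_equal_check_indents : Prop := ∀ (code_string : String), Dom_check_indents code_string → Spec_check_indents code_string (check_indents code_string)

-- ===== LEMMAS AND PROOFS =====

theorem pvIndent_nonneg (cs : List Char) : 0 ≤ pvIndent cs := by
  have := List.length_dropWhile_le (p := fun c => c == ' ') (l := cs)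
  simp only [pvIndent]; omega

theorem pv_mod_zero (d : Int) : PySem.Int.mod 0 d = 0 := by
  rw [PySem.Int.mod_eq_zero_iff_dvd]; exact dvd_zero d

theorem firstPos_cons_pos (x : Int) (xs : List Int) (h : x > 0) :
    pvFirstPos (x :: xs) = x := by simp [pvFirstPos, h]

theorem firstPos_cons_nonpos (x : Int) (xs : List Int) (h : ¬ x > 0) :
    pvFirstPos (x :: xs) = pvFirstPos xs := by simp [pvFirstPos, h]

theorem pvAltGo_pos (ls : List (List Char)) (d : Int) (hd : d ≠ 0) :
    pvAltGo ls d = ls.all (fun l => PySem.Int.mod (pvIndent l) d == 0) := by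
  induction ls with
  | nil => simp [pvAltGo]
  | cons l ls ih =>
    simp only [pvAltGo, List.all_cons]
    rw [if_neg hd]
    by_cases h : PySem.Int.mod (pvIndent l) d = 0
    · simp [h, ih]
    · simp [h]

-- B's loop before any divisor is fixed, characterised by A's three-phase value
theorem pvAltGo_zero (ls : List (List Char)) :
    pvAltGo ls 0 =
      (if pvFirstPos (ls.map pvIndent) = 0 then (ls.map pvIndent).all (fun x => x == 0)
       else if pvFirstPos (ls.map pvIndent) ≠ 2 ∧ pvFirstPos (ls.map pvIndent) ≠ 4 then false
       else (ls.map pvIndent).all (fun x => PySem.Int.mod x (pvFirstPos (ls.map pvIndent)) == 0)) := by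
  induction ls with
  | nil => simp [pvAltGo, pvFirstPos]
  | cons l ls ih =>
    have hnn := pvIndent_nonneg l
    by_cases hpos : pvIndent l > 0
    · have hL : pvAltGo (l :: ls) 0
          = if pvIndent l ≠ 2 ∧ pvIndent l ≠ 4 then false else pvAltGo ls (pvIndent l) := by
        simp [pvAltGo, hpos]
      rw [hL, List.map_cons, firstPos_cons_pos _ _ hpos]
      by_cases h24 : pvIndent l ≠ 2 ∧ pvIndent l ≠ 4
      · rw [if_pos h24, if_neg (by omega), if_pos h24]
      · rw [if_neg h24, if_neg (by omega), if_neg h24, List.all_cons,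
          pvAltGo_pos ls _ (by omega)]
        push Not at h24
        have hm : PySem.Int.mod (pvIndent l) (pvIndent l) = 0 := by
          by_cases h2 : pvIndent l = 2
          · rw [h2]; decide
          · rw [h24 h2]; decide
        simp [hm]; rfl
    · have hz : pvIndent l = 0 := by omega
      have hL : pvAltGo (l :: ls) 0 = pvAltGo ls 0 := by simp [pvAltGo, hpos]
      rw [hL, ih, List.map_cons, hz, firstPos_cons_nonpos _ _ (by omega)]
      by_cases hd : pvFirstPos (ls.map pvIndent) = 0
      · simp [hd]
      · rw [if_neg hd, if_neg hd]
        by_cases h24 : pvFirstPos (ls.map pvIndent) ≠ 2 ∧ pvFirstPos (ls.map pvIndent) ≠ 4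
        · simp [h24]
        · rw [if_neg h24, if_neg h24, List.all_cons]
          simp [pv_mod_zero]

-- ===== VERDICT (by name: the statement is the Claim_ definition above) =====
theorem check_indents_spec : Claim_equal_check_indents := by
  intro s _
  unfold Spec_check_indents
  show check_indents s = check_indents_alt s
  simp only [check_indents, check_indents_alt, PySem.List.foldl_append_singleton_eq_map,
    List.nil_append]
  cases h : PySem.Chars.splitOn (PySem.Chars.strip s.toList) ['\n'] with
  | nil => simp [pvFirstPos, PySem.List.pyGetD, PySem.List.pyGet?]
  | cons first rest =>
    simp only [List.map_cons]
    have hget : PySem.List.pyGetD (pvIndent first :: rest.map pvIndent) 0 (0:Int)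
        = pvIndent first := by
      simp [PySem.List.pyGetD, PySem.List.pyGet?, PySem.List.pyIdx?]
    by_cases h0 : pvIndent first = 0
    · rw [hget, if_neg (by simp [h0]), h0, firstPos_cons_nonpos _ _ (by omega),
        if_neg (by decide : ¬ ((0:Int) ≠ 0)), pvAltGo_zero]
      by_cases hd : pvFirstPos (rest.map pvIndent) = 0
      · simp [hd]
      · rw [if_neg hd, if_neg hd]
        by_cases h24 : pvFirstPos (rest.map pvIndent) ≠ 2 ∧ pvFirstPos (rest.map pvIndent) ≠ 4
        · simp [h24]
        · rw [if_neg h24, if_neg h24, List.all_cons]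
          simp [pv_mod_zero]
    · rw [hget, if_pos (by simp [h0]), if_pos (by simp [h0])]
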